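-- pv_equiv track=rewrite | github.com/ndra44hunter/arithmatic_formatter | main.py | error_checker
-- ===== SOURCE A (Python) =====
-- def isP_OR_M(opr):
--     return opr in "+-"
--
-- def length_check(string):
--     return len(string)<5
--
-- def is_digit(string):
--     return string.isdigit()
--
-- def arr_join(arr):
--     res = []
--     for item in arr:
--         res+=item
--
--     return res
--
-- def error_checker(arr):
--     res_list=[]
--     res_list.append(len(arr)<6)
--     res_list.append(
--         all(
--             map(
--                 isP_OR_M,
--                 [problem.split(" ")[1] for problem in arr]
--             )
--         )
--     )
--     res_list.append(
--         all(
--             map(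
--                 length_check,
--                 arr_join([problem.split(" ")[::2] for problem in arr])
--             )
--         )
--     )
--     res_list.append(
--         all(
--             map(
--                 is_digit,
--                 arr_join([problem.split(" ")[::2] for problem in arr])
--             )
--         )
--     )
--
--     return res_list
-- ===== SOURCE B (Python) =====
-- def error_checker(arr):
--     op_ok = True
--     len_ok = True
--     digit_ok = True
--     for problem in arr:
--         parts = problem.split(" ")
--         op = parts[1]
--         operands = parts[::2]
--         op_ok = op_ok and (op in "+-")
--         len_ok = len_ok and all(len(s) < 5 for s in operands)
--         digit_ok = digit_ok and all(s.isdigit() for s in operands)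
--     return [len(arr) < 6, op_ok, len_ok, digit_ok]
-- ===== Notes on version B (the rewrite author's own statement) =====
-- stated objective: simpler
-- what changed: A builds each problem's split three separate times in four independent passes (two list comprehensions, a manual arr_join concatenation and all/map); B does one loop over arr, splitting each problem once and maintaining three boolean accumulators.
import Mathlib
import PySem

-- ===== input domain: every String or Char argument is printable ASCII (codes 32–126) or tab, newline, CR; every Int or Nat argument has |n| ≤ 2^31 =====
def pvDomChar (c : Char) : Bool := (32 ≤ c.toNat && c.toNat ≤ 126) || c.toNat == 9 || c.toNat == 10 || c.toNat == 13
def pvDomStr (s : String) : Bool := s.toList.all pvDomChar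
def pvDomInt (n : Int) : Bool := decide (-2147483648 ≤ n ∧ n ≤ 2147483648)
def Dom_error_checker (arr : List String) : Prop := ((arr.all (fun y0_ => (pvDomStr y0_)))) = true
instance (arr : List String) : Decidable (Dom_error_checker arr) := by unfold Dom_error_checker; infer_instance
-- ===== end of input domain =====

-- ===== PORT A =====
-- B replaces A's four independent passes (three re-splits per problem plus a manual join) by one
-- loop that splits each problem once and carries three boolean accumulators (objective: simpler).
def isP_OR_M (opr : String) : Bool := PySem.Str.isIn opr "+-"

def length_check (s : String) : Bool := decide (PySem.Str.len s < 5)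

def is_digit (s : String) : Bool := PySem.Str.strIsdigit s

def arr_join (arr : List (List String)) : List String :=
  arr.foldl (fun res item => res ++ item) []

-- split? returns none only for an empty separator, never for " "; pyGet? … 1 is none exactly where
-- Python's problem.split(" ")[1] raises IndexError — Pre_ excludes those inputs, so .getD is never taken
def error_checker (arr : List String) : List Bool :=
  let r1 := decide (arr.length < 6)
  let r2 := ((arr.map (fun problem =>
      (PySem.List.pyGet? ((PySem.Str.split? problem " ").getD []) 1).getD "")).map isP_OR_M).all id
  let r3 := ((arr_join (arr.map (fun problem =>
      (PySem.List.slice? ((PySem.Str.split? problem " ").getD []) none none 2).getD []))).map length_check).all id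
  let r4 := ((arr_join (arr.map (fun problem =>
      (PySem.List.slice? ((PySem.Str.split? problem " ").getD []) none none 2).getD []))).map is_digit).all id
  [r1, r2, r3, r4]

-- ===== PORT B =====
def error_checker_alt (arr : List String) : List Bool :=
  let st := arr.foldl (fun (st : Bool × Bool × Bool) problem =>
      let parts := (PySem.Str.split? problem " ").getD []
      let op := (PySem.List.pyGet? parts 1).getD ""
      let operands := (PySem.List.slice? parts none none 2).getD []
      (st.1 && PySem.Str.isIn op "+-",
       st.2.1 && operands.all (fun s => decide (PySem.Str.len s < 5)),
       st.2.2 && operands.all PySem.Str.strIsdigit)) (true, true, true)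
  [decide (arr.length < 6), st.1, st.2.1, st.2.2]

-- ===== PRECONDITION & SPEC =====
-- Pre_ excludes exactly the inputs where some problem contains no space: there problem.split(" ")[1]
-- raises IndexError in A (and parts[1] in B alike).
def Pre_error_checker (arr : List String) : Prop :=
  ∀ problem ∈ arr, (' ' : Char) ∈ problem.toList
instance (arr : List String) : Decidable (Pre_error_checker arr) := by unfold Pre_error_checker; infer_instance

def pvWitness_error_checker : List String := ["32 + 8", "123 - 45"]

def Spec_error_checker (arr : List String) (out : List Bool) : Prop := out = error_checker_alt arr
instance (arr : List String) (out : List Bool) : Decidable (Spec_error_checker arr out) := by unfold Spec_error_checker; infer_instance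

-- ===== CLAIM (what is proved, stated in full; the proofs are below) =====
def Claim_equal_error_checker : Prop := ∀ (arr : List String), Dom_error_checker arr → Pre_error_checker arr → Spec_error_checker arr (error_checker arr)

-- ===== LEMMAS AND PROOFS =====

theorem foldl_triple_and (g1 g2 g3 : String → Bool) (l : List String) (a b c : Bool) :
    l.foldl (fun (st : Bool × Bool × Bool) p => (st.1 && g1 p, st.2.1 && g2 p, st.2.2 && g3 p)) (a, b, c)
      = (a && l.all g1, b && l.all g2, c && l.all g3) := by
  induction l generalizing a b c with
  | nil => simp
  | cons x xs ih => simp [List.foldl_cons, ih, Bool.and_assoc]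

theorem arr_join_eq_flatten (l : List (List String)) : arr_join l = l.flatten := by
  simpa using PySem.List.foldl_append_eq_flatten (xs := l) (acc := ([] : List String))

-- ===== VERDICT (by name: the statement is the Claim_ definition above) =====
theorem error_checker_spec : Claim_equal_error_checker := by
  intro arr _ _
  unfold Spec_error_checker error_checker error_checker_alt
  rw [foldl_triple_and]
  simp only [arr_join_eq_flatten, List.all_map, List.all_flatten, Bool.true_and,
    List.cons.injEq, and_true]
  trivial
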